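-- pv_equiv track=rewrite | github.com/Angelou-cious/python_notes | 5.Python String Exercise/04_lowercase_first.py | lower_case
-- ===== SOURCE A (Python) =====
-- def lower_case(str):                    # Function definition that takes a string parameter
--
--     lower = []                         # Initialize empty list to store lowercase characters
--     upper = []                         # Initialize empty list to store uppercase characters
--
--     for char in str:                   # Loop through each character in the input string
--         if char.islower():             # Check if current character is lowercase
--             lower.append(char)          # If lowercase, add it to lower list
--         else:
--             upper.append(char)          # If uppercase, add it to upper list
--
--     return ''.join(lower + upper)      # Combine both lists and convert back to string
-- ===== SOURCE B (Python) =====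
-- def lower_case(str):
--     # Stable sort: lowercase chars (key False=0) first, everything else after,
--     # each group keeping its original order because sorted() is stable.
--     return ''.join(sorted(str, key=lambda c: not c.islower()))
-- ===== Notes on version B (the rewrite author's own statement) =====
-- stated objective: idiomatic
-- what changed: Replaces the two-bucket partition loop with a single stable sort keyed on whether the character is not lowercase, so the ordering comes from sort stability instead of appending to separate lists.
import Mathlib
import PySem

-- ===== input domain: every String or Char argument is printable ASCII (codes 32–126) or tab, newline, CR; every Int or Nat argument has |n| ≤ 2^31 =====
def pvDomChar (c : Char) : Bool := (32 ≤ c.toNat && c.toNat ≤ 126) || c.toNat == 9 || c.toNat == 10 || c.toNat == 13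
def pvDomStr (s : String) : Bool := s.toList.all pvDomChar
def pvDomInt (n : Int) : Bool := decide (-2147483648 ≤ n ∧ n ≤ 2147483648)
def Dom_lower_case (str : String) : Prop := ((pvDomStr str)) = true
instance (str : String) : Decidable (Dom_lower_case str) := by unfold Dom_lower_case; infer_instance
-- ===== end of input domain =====

-- B replaces A's two-bucket partition loop with a single stable sort keyed on "not islower" (idiomatic; same return value).


-- ===== PORT A =====
-- for char in str: append to `lower` or `upper`; return ''.join(lower + upper)
def lower_case (str : String) : String :=
  let r := str.toList.foldl
    (fun (acc : List Char × List Char) char =>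
      if PySem.Chars.islower char then (acc.1 ++ [char], acc.2)
      else (acc.1, acc.2 ++ [char]))
    ([], [])
  String.ofList (r.1 ++ r.2)

-- ===== PORT B =====
-- ''.join(sorted(str, key=lambda c: not c.islower())); the bool key is ported as 0/1
def lower_case_alt (str : String) : String :=
  String.ofList (PySem.List.sorted str.toList
    (fun c => if PySem.Chars.islower c then (0 : Int) else 1))

-- ===== PRECONDITION & SPEC =====
def Spec_lower_case (str : String) (out : String) : Prop := out = lower_case_alt str
instance (str : String) (out : String) : Decidable (Spec_lower_case str out) := by unfold Spec_lower_case; infer_instance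

-- ===== CLAIM (what is proved, stated in full; the proofs are below) =====
def Claim_equal_lower_case : Prop := ∀ (str : String), Dom_lower_case str → Spec_lower_case str (lower_case str)

-- ===== LEMMAS AND PROOFS =====

-- the insertion comparison of B's sort, and the partition predicate
def pvKey (c : Char) : Int := if PySem.Chars.islower c then 0 else 1
def pvBefore (a b : Char) : Bool := decide (pvKey a < pvKey b)

theorem pvBefore_eq (x y : Char) :
    pvBefore x y = (PySem.Chars.islower x && !PySem.Chars.islower y) := by
  unfold pvBefore pvKey
  by_cases hx : PySem.Chars.islower x <;> by_cases hy : PySem.Chars.islower y <;>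
    simp [hx, hy]

theorem insertBy_append_left (x : Char) (L U : List Char)
    (h : ∀ y ∈ L, pvBefore x y = false) :
    PySem.List.insertBy pvBefore x (L ++ U) = L ++ PySem.List.insertBy pvBefore x U := by
  induction L with
  | nil => simp
  | cons a L ih =>
    have ha : pvBefore x a = false := h a (by simp)
    simp only [List.cons_append, PySem.List.insertBy, ha]
    simp [ih (fun y hy => h y (by simp [hy]))]

theorem insertBy_all_before (x : Char) (U : List Char)
    (h : ∀ y ∈ U, pvBefore x y = true) :
    PySem.List.insertBy pvBefore x U = x :: U := by
  cases U with
  | nil => rfl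
  | cons a U => simp [PySem.List.insertBy, h a (by simp)]

-- the insertion-sort fold keeps a partitioned accumulator: lowers on the left, others on the right
theorem foldl_insertBy_partition (xs L U : List Char)
    (hL : ∀ c ∈ L, PySem.Chars.islower c = true)
    (hU : ∀ c ∈ U, PySem.Chars.islower c = false) :
    List.foldl (fun acc x => PySem.List.insertBy pvBefore x acc) (L ++ U) xs
      = (L ++ xs.filter (fun c => PySem.Chars.islower c))
        ++ (U ++ xs.filter (fun c => !PySem.Chars.islower c)) := by
  induction xs generalizing L U with
  | nil => simp
  | cons x xs ih =>
    by_cases hx : PySem.Chars.islower x = true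
    · have hstep : PySem.List.insertBy pvBefore x (L ++ U) = (L ++ [x]) ++ U := by
        rw [insertBy_append_left x L U
          (fun y hy => by simp [pvBefore_eq, hL y hy])]
        rw [insertBy_all_before x U
          (fun y hy => by simp [pvBefore_eq, hx, hU y hy])]
        simp
      simp only [List.foldl_cons, hstep]
      rw [ih (L ++ [x]) U
        (by intro c hc; rcases List.mem_append.mp hc with h | h
            · exact hL c h
            · simp at h; simpa [h] using hx) hU]
      simp [hx]
    · have hstep : PySem.List.insertBy pvBefore x (L ++ U) = L ++ (U ++ [x]) := by
        rw [← List.append_assoc]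
        exact PySem.List.insertBy_of_forall_not_before pvBefore x (L ++ U)
          (fun y _ => by simp [pvBefore_eq, hx])
      simp only [List.foldl_cons, hstep]
      rw [ih L (U ++ [x]) hL
        (by intro c hc; rcases List.mem_append.mp hc with h | h
            · exact hU c h
            · simp at h; subst h; simpa using hx)]
      simp [hx]

-- A's two-bucket fold computes the two filters
theorem foldl_buckets (xs l u : List Char) :
    List.foldl
      (fun (acc : List Char × List Char) char =>
        if PySem.Chars.islower char then (acc.1 ++ [char], acc.2)
        else (acc.1, acc.2 ++ [char]))
      (l, u) xs
      = (l ++ xs.filter (fun c => PySem.Chars.islower c),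
         u ++ xs.filter (fun c => !PySem.Chars.islower c)) := by
  induction xs generalizing l u with
  | nil => simp
  | cons x xs ih =>
    by_cases hx : PySem.Chars.islower x = true <;>
      simp [hx, ih]

-- ===== VERDICT (by name: the statement is the Claim_ definition above) =====
theorem lower_case_spec : Claim_equal_lower_case := by
  intro str _
  show lower_case str = lower_case_alt str
  unfold lower_case lower_case_alt
  rw [PySem.List.sorted_eq_foldl_insertBy]
  have hb : (fun a b => decide (((fun c => if PySem.Chars.islower c then (0:Int) else 1) a)
      < ((fun c => if PySem.Chars.islower c then (0:Int) else 1) b))) = pvBefore := by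
    funext a b; rfl
  rw [hb]
  have := foldl_insertBy_partition str.toList [] [] (by simp) (by simp)
  simp only [List.nil_append] at this
  rw [this, foldl_buckets str.toList [] []]
  simp
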